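-- pv_equiv track=rewrite | github.com/lvmoney/lvmoney-frame-parent | lvmoney-frame-ai/lvmoney-frame-ai-python/src/main/resources/DetectorUtil.py | turningPoints
-- ===== SOURCE A (Python) =====
-- def turningPoints(array):
--     '''
--     turning_points(array) -> min_indices, max_indices
--     Finds the turning points within an 1D array and returns the indices of the minimum and
--     maximum turning points in two separate lists.
--     获得数据转折点
--     '''
--     idx_max, idx_min = [], []
--     if (len(array) < 3):
--         return idx_min, idx_max
--
--     NEUTRAL, RISING, FALLING = range(3)
--
--     def get_state(a, b):
--         if a < b: return RISING
--         if a > b: return FALLING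
--         return NEUTRAL
--
--     ps = get_state(array[0], array[1])
--     begin = 1
--     for i in range(2, len(array)):
--         s = get_state(array[i - 1], array[i])
--         if s != NEUTRAL:
--             if ps != NEUTRAL and ps != s:
--                 if s == FALLING:
--                     idx_max.append((begin + i - 1) // 2)
--                 else:
--                     idx_min.append((begin + i - 1) // 2)
--             begin = i
--             ps = s
--     return idx_min, idx_max
-- ===== SOURCE B (Python) =====
-- def turningPoints(array):
--     """Difference-sign table + compressed scan of non-flat runs (alternative decomposition)."""
--     idx_min, idx_max = [], []
--     if len(array) < 3:
--         return idx_min, idx_max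
--     signs = [(array[j] < array[j + 1]) - (array[j] > array[j + 1])
--              for j in range(len(array) - 1)]
--     nz = [(j + 1, s) for j, s in enumerate(signs) if s != 0]
--     for (i1, s1), (i2, s2) in zip(nz, nz[1:]):
--         if s1 != s2:
--             (idx_max if s2 < 0 else idx_min).append((i1 + i2 - 1) // 2)
--     return idx_min, idx_max
-- ===== Notes on version B (the rewrite author's own statement) =====
-- stated objective: alternative
-- what changed: B materialises a +1/0/-1 difference-sign table, compresses it to the list of non-flat positions, and emits one turning point per adjacent pair of opposite signs, instead of A's single online state machine carrying ps/begin through the raw array.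
import Mathlib
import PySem

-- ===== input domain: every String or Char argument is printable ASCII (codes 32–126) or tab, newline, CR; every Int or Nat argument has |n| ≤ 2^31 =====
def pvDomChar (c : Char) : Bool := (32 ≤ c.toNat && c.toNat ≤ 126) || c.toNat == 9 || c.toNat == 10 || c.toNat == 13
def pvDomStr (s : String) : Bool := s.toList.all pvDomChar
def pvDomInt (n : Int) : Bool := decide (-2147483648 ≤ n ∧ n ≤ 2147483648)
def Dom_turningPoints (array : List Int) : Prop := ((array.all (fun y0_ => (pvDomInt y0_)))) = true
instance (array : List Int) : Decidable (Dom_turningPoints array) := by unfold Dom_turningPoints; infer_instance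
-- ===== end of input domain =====

-- B replaces A's online ps/begin state machine by a materialised difference-sign table
-- compressed to its non-flat entries, scanned in adjacent pairs (alternative decomposition).

-- ===== PORT A =====
-- A's static coding: NEUTRAL=0, RISING=1, FALLING=2
def tpGetState (a b : Int) : Int :=
  if a < b then 1 else if a > b then 2 else 0

-- one iteration of A's for-loop; state = (idx_max, idx_min, ps, begin), s already computed
def tpStep (st : List Int × List Int × Int × Int) (i s : Int) :
    List Int × List Int × Int × Int :=
  if s ≠ 0 then
    let acc : List Int × List Int :=
      if st.2.2.1 ≠ 0 ∧ st.2.2.1 ≠ s then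
        if s = 2 then (st.1 ++ [PySem.Int.floordiv (st.2.2.2 + i - 1) 2], st.2.1)
        else (st.1, st.2.1 ++ [PySem.Int.floordiv (st.2.2.2 + i - 1) 2])
      else (st.1, st.2.1)
    (acc.1, acc.2, s, i)
  else st

-- the loop body reading array[i-1], array[i] (indices are provably in range; default never used)
def tpStepA (array : List Int) (st : List Int × List Int × Int × Int) (i : Int) :
    List Int × List Int × Int × Int :=
  tpStep st i (tpGetState (PySem.List.pyGetD array (i - 1) 0) (PySem.List.pyGetD array i 0))

def turningPoints (array : List Int) : List Int × List Int :=
  if array.length < 3 then ([], []) else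
    let st :=
      (PySem.List.pyRange 2 (array.length : Int) 1).foldl (tpStepA array)
        ([], [], tpGetState (PySem.List.pyGetD array 0 0) (PySem.List.pyGetD array 1 0), 1)
    (st.2.1, st.1)

-- ===== PORT B =====
-- the difference-sign table: (array[j] < array[j+1]) - (array[j] > array[j+1])
def tpSigns (array : List Int) : List Int :=
  (List.range (array.length - 1)).map (fun (j : Nat) =>
    (if PySem.List.pyGetD array (j : Int) 0 < PySem.List.pyGetD array ((j : Int) + 1) 0 then (1 : Int) else 0)
    - (if PySem.List.pyGetD array (j : Int) 0 > PySem.List.pyGetD array ((j : Int) + 1) 0 then 1 else 0))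

-- B's loop body over an adjacent pair ((i1,s1),(i2,s2)) of non-flat entries; acc = (idx_min, idx_max)
def tpStepB (acc : List Int × List Int) (p : (Int × Int) × (Int × Int)) : List Int × List Int :=
  if p.1.2 ≠ p.2.2 then
    if p.2.2 < 0 then (acc.1, acc.2 ++ [PySem.Int.floordiv (p.1.1 + p.2.1 - 1) 2])
    else (acc.1 ++ [PySem.Int.floordiv (p.1.1 + p.2.1 - 1) 2], acc.2)
  else acc

def turningPoints_alt (array : List Int) : List Int × List Int :=
  if array.length < 3 then ([], []) else
    let signs := tpSigns array
    let nz := (PySem.List.enumerate signs 0).filterMap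
      (fun p => if p.2 ≠ 0 then some (p.1 + 1, p.2) else none)
    (nz.zip nz.tail).foldl tpStepB ([], [])

-- ===== PRECONDITION & SPEC =====
def Spec_turningPoints (array : List Int) (out : List Int × List Int) : Prop := out = turningPoints_alt array
instance (array : List Int) (out : List Int × List Int) : Decidable (Spec_turningPoints array out) := by unfold Spec_turningPoints; infer_instance

-- ===== CLAIM (what is proved, stated in full; the proofs are below) =====
def Claim_equal_turningPoints : Prop := ∀ (array : List Int), Dom_turningPoints array → Spec_turningPoints array (turningPoints array)

-- ===== LEMMAS AND PROOFS =====

-- B's ±1 sign coding translated to A's state coding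
def tpSign (s : Int) : Int := if s = 1 then 1 else if s = -1 then 2 else 0

-- A's loop replayed over the sign table, k = current loop index i
def tpLoopA : List Int → Int → (List Int × List Int × Int × Int) → List Int × List Int
  | [], _, st => (st.2.1, st.1)
  | s :: rest, k, st => tpLoopA rest (k + 1) (tpStep st k (tpSign s))

-- the compressed non-flat entries of a sign table, first entry at index k
def tpNz : Int → List Int → List (Int × Int)
  | _, [] => []
  | k, s :: rest => if s ≠ 0 then (k, s) :: tpNz (k + 1) rest else tpNz (k + 1) rest

-- B's pair fold with the previous element carried explicitly
def tpLoopB : List (Int × Int) → (Int × Int) → (List Int × List Int) → List Int × List Int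
  | [], _, acc => acc
  | y :: l, x, acc => tpLoopB l y (tpStepB acc (x, y))

lemma tpZipFold (l : List (Int × Int)) : ∀ (x : Int × Int) (acc : List Int × List Int),
    ((x :: l).zip l).foldl tpStepB acc = tpLoopB l x acc := by
  induction l with
  | nil => intro x acc; rfl
  | cons y l ih => intro x acc; simp only [List.zip_cons_cons, List.foldl_cons, tpLoopB]; exact ih y _

lemma tpEnumFM (l : List Int) : ∀ (k : Int),
    (PySem.List.enumerate l k).filterMap
      (fun p => if p.2 ≠ 0 then some (p.1 + 1, p.2) else none) = tpNz (k + 1) l := by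
  induction l with
  | nil => intro k; rfl
  | cons s rest ih =>
    intro k
    rw [PySem.List.enumerate_cons, List.filterMap_cons, ih (k + 1)]
    by_cases h : s = 0 <;> simp [tpNz, h]

lemma tpValid (array : List Int) : ∀ s ∈ tpSigns array, s = 1 ∨ s = 0 ∨ s = -1 := by
  intro s hs
  simp only [tpSigns, List.mem_map] at hs
  obtain ⟨j, -, rfl⟩ := hs
  split_ifs <;> omega

lemma tpSign_entry (array : List Int) (j : Nat) (hj : j + 1 < array.length) :
    tpSign ((tpSigns array).getD j 0) = tpGetState (array.getD j 0) (array.getD (j + 1) 0) := by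
  have hjn : j < array.length - 1 := by omega
  unfold tpSigns
  rw [PySem.List.getD_map_range _ _ _ _ hjn]
  have h1 : ((j : Int) + 1) = ((j + 1 : Nat) : Int) := by push_cast; ring
  rw [h1]
  simp only [PySem.List.pyGetD_natCast]
  unfold tpSign tpGetState
  split_ifs <;> omega

lemma tpBridge (sgl : List Int) : (∀ s ∈ sgl, s = 1 ∨ s = 0 ∨ s = -1) →
    ∀ (k i0 s0 : Int) (mx mn : List Int), (s0 = 1 ∨ s0 = -1) →
    tpLoopA sgl k (mx, mn, tpSign s0, i0) = tpLoopB (tpNz k sgl) (i0, s0) (mn, mx) := by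
  induction sgl with
  | nil => intro _ k i0 s0 mx mn _; rfl
  | cons s rest ih =>
    intro hv k i0 s0 mx mn hs0
    have hvr : ∀ x ∈ rest, x = 1 ∨ x = 0 ∨ x = -1 := fun x hx => hv x (List.mem_cons_of_mem _ hx)
    have hvs := hv s List.mem_cons_self
    rcases hvs with rfl | rfl | rfl
    · -- s = 1
      rcases hs0 with rfl | rfl
      · simp only [tpLoopA, tpNz, tpStep, tpSign]
        norm_num
        simpa [tpSign, tpLoopB, tpStepB] using ih hvr (k + 1) k 1 mx mn (Or.inl rfl)
      · simp only [tpLoopA, tpNz, tpStep, tpSign]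
        norm_num
        simpa [tpSign, tpLoopB, tpStepB] using ih hvr (k + 1) k 1 mx (mn ++ [PySem.Int.floordiv (i0 + k - 1) 2]) (Or.inl rfl)
    · -- s = 0
      simp only [tpLoopA, tpNz, tpStep, tpSign]
      norm_num
      simpa [tpSign, tpLoopB, tpStepB] using ih hvr (k + 1) i0 s0 mx mn hs0
    · -- s = -1
      rcases hs0 with rfl | rfl
      · simp only [tpLoopA, tpNz, tpStep, tpSign]
        norm_num
        simpa [tpSign, tpLoopB, tpStepB] using ih hvr (k + 1) k (-1) (mx ++ [PySem.Int.floordiv (i0 + k - 1) 2]) mn (Or.inr rfl)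
      · simp only [tpLoopA, tpNz, tpStep, tpSign]
        norm_num
        simpa [tpSign, tpLoopB, tpStepB] using ih hvr (k + 1) k (-1) mx mn (Or.inr rfl)

lemma tpNeutral (sgl : List Int) : (∀ s ∈ sgl, s = 1 ∨ s = 0 ∨ s = -1) →
    ∀ (k bg : Int) (mx mn : List Int),
    tpLoopA sgl k (mx, mn, 0, bg) =
      ((tpNz k sgl).zip (tpNz k sgl).tail).foldl tpStepB (mn, mx) := by
  induction sgl with
  | nil => intro _ k bg mx mn; rfl
  | cons s rest ih =>
    intro hv k bg mx mn
    have hvr : ∀ x ∈ rest, x = 1 ∨ x = 0 ∨ x = -1 := fun x hx => hv x (List.mem_cons_of_mem _ hx)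
    have hvs := hv s List.mem_cons_self
    rcases hvs with rfl | rfl | rfl
    · simp only [tpLoopA, tpNz, tpStep, tpSign]
      norm_num
      rw [tpZipFold]
      simpa [tpSign, tpLoopB, tpStepB] using tpBridge rest hvr (k + 1) k 1 mx mn (Or.inl rfl)
    · simp only [tpLoopA, tpNz, tpStep, tpSign]
      norm_num
      simpa [tpSign, tpLoopB, tpStepB] using ih hvr (k + 1) bg mx mn
    · simp only [tpLoopA, tpNz, tpStep, tpSign]
      norm_num
      rw [tpZipFold]
      simpa [tpSign, tpLoopB, tpStepB] using tpBridge rest hvr (k + 1) k (-1) mx mn (Or.inr rfl)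

lemma tpFoldA (array : List Int) : ∀ (m k : Nat), 2 ≤ k → k + m = array.length →
    ∀ st : List Int × List Int × Int × Int,
    (let r := (PySem.List.pyRange (k : Int) (array.length : Int) 1).foldl (tpStepA array) st
     (r.2.1, r.1)) = tpLoopA ((tpSigns array).drop (k - 1)) (k : Int) st := by
  intro m
  induction m with
  | zero =>
    intro k hk2 hk st
    have h1 : (array.length : Int) ≤ (k : Int) := by omega
    have hlen : (tpSigns array).length = array.length - 1 := by simp [tpSigns]
    have h2 : (tpSigns array).drop (k - 1) = [] := by
      apply List.drop_eq_nil_of_le; omega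
    rw [PySem.List.pyRange_one_eq_nil h1, h2]
    rfl
  | succ m ih =>
    intro k hk2 hk st
    have hkn : (k : Int) < (array.length : Int) := by omega
    rw [PySem.List.pyRange_one_cons hkn]
    have hj : k - 1 < (tpSigns array).length := by simp [tpSigns]; omega
    rw [List.drop_eq_getElem_cons hj]
    simp only [List.foldl_cons, tpLoopA]
    have hstep : tpStepA array st (k : Int) = tpStep st (k : Int) (tpSign ((tpSigns array)[k - 1])) := by
      unfold tpStepA
      have e1 : ((k : Int) - 1) = ((k - 1 : Nat) : Int) := by omega
      rw [e1, PySem.List.pyGetD_natCast, PySem.List.pyGetD_natCast,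
        ← List.getD_eq_getElem (tpSigns array) 0 hj, tpSign_entry array (k - 1) (by omega)]
      have e2 : k - 1 + 1 = k := by omega
      rw [e2]
    rw [hstep]
    have e3 : ((k : Int) + 1) = ((k + 1 : Nat) : Int) := by push_cast; ring
    have e4 : k - 1 + 1 = (k + 1) - 1 := by omega
    rw [e3, e4]
    exact ih (k + 1) (by omega) (by omega) _

theorem turningPoints_spec : Claim_equal_turningPoints := by
  unfold Claim_equal_turningPoints Spec_turningPoints
  intro array _
  by_cases hlen : array.length < 3
  · unfold turningPoints turningPoints_alt
    rw [if_pos hlen, if_pos hlen]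
  · unfold turningPoints turningPoints_alt
    rw [if_neg hlen, if_neg hlen]
    rw [Nat.not_lt] at hlen
    have hA := tpFoldA array (array.length - 2) 2 (by omega) (by omega)
      ([], [], tpGetState (PySem.List.pyGetD array 0 0) (PySem.List.pyGetD array 1 0), 1)
    simp only [Nat.cast_ofNat] at hA
    simp only []
    rw [hA]
    have hnz : (PySem.List.enumerate (tpSigns array) 0).filterMap
        (fun p => if p.2 ≠ 0 then some (p.1 + 1, p.2) else none) = tpNz 1 (tpSigns array) := by
      have := tpEnumFM (tpSigns array) 0
      simpa using this
    rw [hnz]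
    -- initial state: ps = tpGetState array[0] array[1] = tpSign signs[0]
    have h01 : PySem.List.pyGetD array (0 : Int) 0 = array.getD 0 0 := by
      have : ((0 : Nat) : Int) = (0 : Int) := rfl
      rw [← this, PySem.List.pyGetD_natCast]
    have h11 : PySem.List.pyGetD array (1 : Int) 0 = array.getD 1 0 := by
      have : ((1 : Nat) : Int) = (1 : Int) := rfl
      rw [← this, PySem.List.pyGetD_natCast]
    have hinit : tpGetState (PySem.List.pyGetD array 0 0) (PySem.List.pyGetD array 1 0)
        = tpSign ((tpSigns array).getD 0 0) := by
      rw [h01, h11, tpSign_entry array 0 (by omega)]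
    rw [hinit]
    have hvalid := tpValid array
    obtain ⟨s0, rest, hsg⟩ : ∃ s0 rest, tpSigns array = s0 :: rest := by
      cases h : tpSigns array with
      | nil => exfalso; have : (tpSigns array).length = array.length - 1 := by simp [tpSigns]
               rw [h] at this; simp at this; omega
      | cons a l => exact ⟨a, l, rfl⟩
    rw [hsg]
    rw [hsg] at hvalid
    have hvr : ∀ x ∈ rest, x = 1 ∨ x = 0 ∨ x = -1 := fun x hx => hvalid x (List.mem_cons_of_mem _ hx)
    have hv0 := hvalid s0 List.mem_cons_self
    simp only [List.getD_cons_zero, List.drop_succ_cons, List.drop_zero, tpNz]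
    by_cases h0 : s0 = 0
    · subst h0
      norm_num
      have : tpSign 0 = 0 := by unfold tpSign; norm_num
      rw [this]
      exact tpNeutral rest hvr 2 1 [] []
    · rw [if_pos h0]
      rw [List.tail_cons, tpZipFold]
      have hs0 : s0 = 1 ∨ s0 = -1 := by rcases hv0 with h | h | h <;> first | exact Or.inl h | exact absurd h h0 | exact Or.inr h
      exact tpBridge rest hvr 2 1 s0 [] [] hs0
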